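-- pv_equiv track=rewrite | github.com/lishuwnc/Kickstart-Framework-Python | archive/F2017.py | solveFA2017
-- ===== SOURCE A (Python) =====
-- def solveFA2017(n, v):
--     p, q = 1, n
--     if n % 2 == 1:
--         a = n // 2
--         if v[a] == p:
--             p += 1
--         elif v[a] == q:
--             q -= 1
--         else:
--             return 'NO'
--         a, b = a - 1, a + 1
--         n -= 1
--     else:
--         a, b = n // 2 - 1, n // 2
--     while n > 0:
--         if n % 2 == 0:
--             if v[a] == p:
--                 p += 1
--             elif v[a] == q:
--                 q -= 1
--             else:
--                 return 'NO'
--             a -= 1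
--         else:
--             if v[b] == p:
--                 p += 1
--             elif v[b] == q:
--                 q -= 1
--             else:
--                 return 'NO'
--             b += 1
--         n -= 1
--     return 'YES'
-- ===== SOURCE B (Python) =====
-- def solveFA2017(n, v):
--     if n <= 0:
--         return 'YES'
--     # Scan values in the reverse of the center-outward order: n-1, 0, n-2, 1, ...
--     # maintaining one growing contiguous window [lo, hi].
--     lo = hi = v[n - 1]
--     for i in range(1, n):
--         x = v[i // 2] if i % 2 == 1 else v[n - 1 - i // 2]
--         if x == lo - 1:
--             lo = x
--         elif x == hi + 1:
--             hi = x
--         else: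
--             return 'NO'
--     return 'YES' if lo == 1 and hi == n else 'NO'
-- ===== Notes on version B (the rewrite author's own statement) =====
-- stated objective: alternative
-- what changed: A shrinks two pointers from the ends of the value interval [1,n] while walking the array center-outward with two index cursors and parity-driven branching; B scans the positions in the reverse (ends-inward) order and maintains a single growing contiguous window [lo,hi], accepting iff each value extends the window and the final window is exactly [1,n].
-- outside the precondition, e.g. on solveFA2017(-1, [2]): A returns 'NO', B returns 'YES'; on solveFA2017(2, [5]): A returns 'NO', B raises IndexError
import Mathlib
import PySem

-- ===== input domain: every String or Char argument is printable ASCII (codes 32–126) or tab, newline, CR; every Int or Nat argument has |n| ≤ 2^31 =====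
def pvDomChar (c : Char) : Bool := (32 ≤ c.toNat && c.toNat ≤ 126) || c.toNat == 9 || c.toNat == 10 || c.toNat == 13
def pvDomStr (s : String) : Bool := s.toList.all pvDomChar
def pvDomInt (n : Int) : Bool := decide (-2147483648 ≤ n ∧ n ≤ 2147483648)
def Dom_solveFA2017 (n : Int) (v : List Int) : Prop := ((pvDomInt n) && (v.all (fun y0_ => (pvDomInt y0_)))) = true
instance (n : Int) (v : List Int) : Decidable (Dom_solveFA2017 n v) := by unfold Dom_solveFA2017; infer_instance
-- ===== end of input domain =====

-- B replaces A's two shrinking end-pointers (center-outward walk) by one growing contiguous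
-- window scanned in the reverse (ends-inward) order; alternative decomposition, same O(n) cost.


-- ===== PORT A =====
-- the while-loop of A; fuel = the loop counter n (they coincide: n decreases by exactly 1 per iteration)
def loopA (v : List Int) : Nat → Int → Int → Int → Int → Int → String
  | 0, _, _, _, _, _ => "YES"
  | k+1, n, p, q, a, b =>
    if PySem.Int.mod n 2 == 0 then
      if PySem.List.pyGetD v a 0 == p then loopA v k (n-1) (p+1) q (a-1) b
      else if PySem.List.pyGetD v a 0 == q then loopA v k (n-1) p (q-1) (a-1) b
      else "NO"
    else
      if PySem.List.pyGetD v b 0 == p then loopA v k (n-1) (p+1) q a (b+1)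
      else if PySem.List.pyGetD v b 0 == q then loopA v k (n-1) p (q-1) a (b+1)
      else "NO"

def solveFA2017 (n : Int) (v : List Int) : String :=
  let p : Int := 1
  let q : Int := n
  if PySem.Int.mod n 2 == 1 then
    let a := PySem.Int.floordiv n 2
    if PySem.List.pyGetD v a 0 == p then loopA v (n-1).toNat (n-1) (p+1) q (a-1) (a+1)
    else if PySem.List.pyGetD v a 0 == q then loopA v (n-1).toNat (n-1) p (q-1) (a-1) (a+1)
    else "NO"
  else
    loopA v n.toNat n p q (PySem.Int.floordiv n 2 - 1) (PySem.Int.floordiv n 2)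

-- ===== PORT B =====
-- one step of Source B's for-loop; the early 'return NO' is the absorbing none state
def altStep (v : List Int) (n : Int) (st : Option (Int × Int)) (i : Int) : Option (Int × Int) :=
  match st with
  | none => none
  | some (lo, hi) =>
    let x := if PySem.Int.mod i 2 == 1 then PySem.List.pyGetD v (PySem.Int.floordiv i 2) 0
             else PySem.List.pyGetD v (n - 1 - PySem.Int.floordiv i 2) 0
    if x == lo - 1 then some (x, hi)
    else if x == hi + 1 then some (lo, x)
    else none

def solveFA2017_alt (n : Int) (v : List Int) : String :=
  if n ≤ 0 then "YES"
  else
    let first := PySem.List.pyGetD v (n - 1) 0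
    match (PySem.List.pyRange 1 n 1).foldl (altStep v n) (some (first, first)) with
    | none => "NO"
    | some (lo, hi) => if lo == 1 && hi == n then "YES" else "NO"

-- ===== PRECONDITION & SPEC =====
-- Pre_ excludes odd n < 0 (the Python reads v[n//2] through negative-index wraparound, an
-- accident of indexing, and raises IndexError when v is too short) and n > len(v) (the Python
-- raises IndexError whenever the scan reaches a position ≥ len(v)); inside it no access raises.
def Pre_solveFA2017 (n : Int) (v : List Int) : Prop :=
  (0 ≤ n ∧ n ≤ (v.length : Int)) ∨ (n < 0 ∧ PySem.Int.mod n 2 = 0)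
instance (n : Int) (v : List Int) : Decidable (Pre_solveFA2017 n v) := by unfold Pre_solveFA2017; infer_instance
def pvWitness_solveFA2017 : Int × List Int := (3, [2, 1, 3])

def Spec_solveFA2017 (n : Int) (v : List Int) (out : String) : Prop := out = solveFA2017_alt n v
instance (n : Int) (v : List Int) (out : String) : Decidable (Spec_solveFA2017 n v out) := by unfold Spec_solveFA2017; infer_instance

-- ===== CLAIM (what is proved, stated in full; the proofs are below) =====
def Claim_equal_solveFA2017 : Prop := ∀ (n : Int) (v : List Int), Dom_solveFA2017 n v → Pre_solveFA2017 n v → Spec_solveFA2017 n v (solveFA2017 n v)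

-- ===== LEMMAS AND PROOFS =====

-- A's check, abstracted to the list of values it reads: consume from the front, each value
-- must be the low or the high end of the shrinking value interval [p, q]
def shrink : Int → Int → List Int → Bool
  | _, _, [] => true
  | p, q, x :: w => if x = p then shrink (p+1) q w else if x = q then shrink p (q-1) w else false

-- B's growing-window step, abstracted to the value read (none = already failed)
def gstep : Option (Int × Int) → Int → Option (Int × Int)
  | none, _ => none
  | some (lo, hi), x => if x = lo - 1 then some (x, hi) else if x = hi + 1 then some (lo, x) else none

-- the sequence of indices A's while-loop visits, as a list
def idxSeq : Nat → Int → Int → Int → List Int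
  | 0, _, _, _ => []
  | k+1, n, a, b =>
    if PySem.Int.mod n 2 = 0 then a :: idxSeq k (n-1) (a-1) b else b :: idxSeq k (n-1) a (b+1)

theorem mod_two_cases (n : Int) : PySem.Int.mod n 2 = 0 ∨ PySem.Int.mod n 2 = 1 := by
  rw [PySem.Int.mod_eq_emod_of_pos (by norm_num : (0:Int) < 2)]; omega

theorem mod_two_pred (n : Int) (h : PySem.Int.mod n 2 = 0) : PySem.Int.mod (n-1) 2 = 1 := by
  rw [PySem.Int.mod_eq_emod_of_pos (by norm_num : (0:Int) < 2)] at h ⊢; omega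

theorem mod_two_pred' (n : Int) (h : PySem.Int.mod n 2 = 1) : PySem.Int.mod (n-1) 2 = 0 := by
  rw [PySem.Int.mod_eq_emod_of_pos (by norm_num : (0:Int) < 2)] at h ⊢; omega

theorem succ_aux (a b : Int) (j : Nat) :
    ((fun j => if j % 2 = 0 then a - (j/2 : Nat) else b + (j/2 : Nat)) ∘ Nat.succ) j
      = (fun j => if j % 2 = 0 then b + (j/2 : Nat) else (a-1) - (j/2 : Nat)) j := by
  simp only [Function.comp_apply, Nat.succ_eq_add_one]
  rcases Nat.even_or_odd j with hj | hj
  · have h2 : j % 2 = 0 := Nat.even_iff.mp hj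
    have h3 : (j+1) % 2 = 1 := by omega
    have h4 : (j+1)/2 = j/2 := by omega
    simp [h2, h3, h4]
  · have h2 : j % 2 = 1 := Nat.odd_iff.mp hj
    have h3 : (j+1) % 2 = 0 := by omega
    have h4 : (j+1)/2 = j/2 + 1 := by omega
    simp [h2, h3, h4]; ring

theorem succ_aux' (a b : Int) (j : Nat) :
    ((fun j => if j % 2 = 0 then b + (j/2 : Nat) else a - (j/2 : Nat)) ∘ Nat.succ) j
      = (fun j => if j % 2 = 0 then a - (j/2 : Nat) else (b+1) + (j/2 : Nat)) j := by
  simp only [Function.comp_apply, Nat.succ_eq_add_one]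
  rcases Nat.even_or_odd j with hj | hj
  · have h2 : j % 2 = 0 := Nat.even_iff.mp hj
    have h3 : (j+1) % 2 = 1 := by omega
    have h4 : (j+1)/2 = j/2 := by omega
    simp [h2, h3, h4]
  · have h2 : j % 2 = 1 := Nat.odd_iff.mp hj
    have h3 : (j+1) % 2 = 0 := by omega
    have h4 : (j+1)/2 = j/2 + 1 := by omega
    simp [h2, h3, h4]; ring

theorem idxSeq_closed (k : Nat) : ∀ (n a b : Int),
    (PySem.Int.mod n 2 = 0 →
      idxSeq k n a b = (List.range k).map (fun j => if j % 2 = 0 then a - (j/2 : Nat) else b + (j/2 : Nat)))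
    ∧ (PySem.Int.mod n 2 = 1 →
      idxSeq k n a b = (List.range k).map (fun j => if j % 2 = 0 then b + (j/2 : Nat) else a - (j/2 : Nat))) := by
  induction k with
  | zero => intro n a b; simp [idxSeq]
  | succ k ih =>
    intro n a b
    constructor
    · intro h
      rw [show idxSeq (k+1) n a b = a :: idxSeq k (n-1) (a-1) b by simp only [idxSeq]; rw [if_pos h]]
      rw [(ih (n-1) (a-1) b).2 (mod_two_pred n h)]
      rw [List.range_succ_eq_map, List.map_cons, List.map_map]
      refine List.cons_eq_cons.mpr ⟨by norm_num, ?_⟩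
      exact List.map_congr_left (fun j _ => (succ_aux a b j).symm)
    · intro h
      rw [show idxSeq (k+1) n a b = b :: idxSeq k (n-1) a (b+1) by simp only [idxSeq]; rw [if_neg (by rw [h]; norm_num)]]
      rw [(ih (n-1) a (b+1)).1 (mod_two_pred' n h)]
      rw [List.range_succ_eq_map, List.map_cons, List.map_map]
      refine List.cons_eq_cons.mpr ⟨by norm_num, ?_⟩
      exact List.map_congr_left (fun j _ => (succ_aux' a b j).symm)

-- B's index at loop counter i
def hfun (n i : Int) : Int :=
  if PySem.Int.mod i 2 == 1 then PySem.Int.floordiv i 2 else n - 1 - PySem.Int.floordiv i 2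

-- the full index list A visits (including the odd-n centre read)
def fullIdx (n : Int) : List Int :=
  if PySem.Int.mod n 2 = 1 then
    PySem.Int.floordiv n 2 ::
      idxSeq (n-1).toNat (n-1) (PySem.Int.floordiv n 2 - 1) (PySem.Int.floordiv n 2 + 1)
  else
    idxSeq n.toNat n (PySem.Int.floordiv n 2 - 1) (PySem.Int.floordiv n 2)

theorem length_idxSeq (k : Nat) : ∀ (n a b : Int), (idxSeq k n a b).length = k := by
  induction k with
  | zero => intro n a b; simp [idxSeq]
  | succ k ih => intro n a b; simp only [idxSeq]; split_ifs <;> simp [ih]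

theorem length_fullIdx (n : Int) (hn : 0 ≤ n) : (fullIdx n).length = n.toNat := by
  unfold fullIdx
  rcases mod_two_cases n with h | h
  · rw [if_neg (by rw [h]; norm_num)]; exact length_idxSeq _ _ _ _
  · rw [if_pos h]
    have hm : PySem.Int.mod n 2 = n % 2 := PySem.Int.mod_eq_emod_of_pos (by norm_num)
    simp only [List.length_cons, length_idxSeq]
    omega

-- hfun at a nonneg Int argument, in terms of the Nat j

theorem hfun_cast (n : Int) (j : Nat) :
    hfun n (1 + (j:Int)) = if (j+1) % 2 = 1 then (((j+1)/2 : Nat) : Int) else n - 1 - (((j+1)/2 : Nat) : Int) := by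
  unfold hfun
  have h1 : PySem.Int.mod (1 + (j:Int)) 2 = ((j+1) % 2 : Nat) := by
    rw [PySem.Int.mod_eq_emod_of_pos (by norm_num)]; push_cast; omega
  have h2 : PySem.Int.floordiv (1 + (j:Int)) 2 = (((j+1)/2 : Nat) : Int) := by
    rw [PySem.Int.floordiv_eq_ediv_of_pos (by norm_num)]; push_cast; omega
  rw [h1, h2]
  rcases Nat.even_or_odd (j+1) with hj | hj
  · have : (j+1) % 2 = 0 := Nat.even_iff.mp hj
    simp [this]
  · have : (j+1) % 2 = 1 := Nat.odd_iff.mp hj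
    simp [this]

theorem rev_map_range (m : Nat) (f g : Nat → Int) (h : ∀ j, j < m → f (m - 1 - j) = g j) :
    ((List.range m).map f).reverse = (List.range m).map g := by
  apply List.ext_getElem
  · simp
  · intro j hj1 hj2
    simp only [List.length_reverse, List.length_map, List.length_range] at hj1 hj2
    rw [List.getElem_reverse]
    simp only [List.length_map, List.length_range, List.getElem_map, List.getElem_range]
    exact h j hj2

theorem cons_eq_map_range (a : Int) (g : Nat → Int) (k : Nat) :
    a :: (List.range k).map g = (List.range (k+1)).map (fun j => if j = 0 then a else g (j-1)) := by
  rw [List.range_succ_eq_map, List.map_cons]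
  refine List.cons_eq_cons.mpr ⟨(if_pos rfl).symm, ?_⟩
  rw [List.map_map]
  apply List.map_congr_left
  intro j _
  simp

theorem fullIdx_reverse (n : Int) (hn : 1 ≤ n) :
    (fullIdx n).reverse = (n - 1) :: (PySem.List.pyRange 1 n 1).map (hfun n) := by
  have hm : PySem.Int.mod n 2 = n % 2 := PySem.Int.mod_eq_emod_of_pos (by norm_num)
  have hd : PySem.Int.floordiv n 2 = n / 2 := PySem.Int.floordiv_eq_ediv_of_pos (by norm_num)
  have hm1 : (n-1).toNat + 1 = n.toNat := by omega
  rw [PySem.List.pyRange_one, List.map_map,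
      cons_eq_map_range (n-1) (hfun n ∘ fun k => 1 + (k:Int)) (n-1).toNat, hm1]
  rcases mod_two_cases n with h | h
  · -- n even
    have hfe : fullIdx n = (List.range n.toNat).map
        (fun j => if j % 2 = 0 then (PySem.Int.floordiv n 2 - 1) - (j/2 : Nat)
                  else PySem.Int.floordiv n 2 + (j/2 : Nat)) := by
      unfold fullIdx
      rw [if_neg (by rw [h]; norm_num)]
      exact (idxSeq_closed n.toNat n _ _).1 h
    rw [hfe]
    simp only [hd]
    rw [hm] at h
    apply rev_map_range
    intro j hj
    rcases Nat.eq_zero_or_pos j with hj0 | hj0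
    · subst hj0
      rw [if_pos rfl]
      split_ifs with hpar <;> omega
    · rw [if_neg (by omega : ¬ j = 0)]
      simp only [Function.comp_apply]
      rw [hfun_cast]
      split_ifs <;> omega
  · -- n odd
    have h1 : PySem.Int.mod (n-1) 2 = 0 := mod_two_pred' n h
    have hfe : fullIdx n = (List.range n.toNat).map
        (fun j => if j = 0 then PySem.Int.floordiv n 2 else
          (if (j-1) % 2 = 0 then (PySem.Int.floordiv n 2 - 1) - ((j-1)/2 : Nat)
           else (PySem.Int.floordiv n 2 + 1) + ((j-1)/2 : Nat))) := by
      unfold fullIdx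
      rw [if_pos h, (idxSeq_closed (n-1).toNat (n-1) _ _).1 h1,
          cons_eq_map_range _ _ (n-1).toNat, hm1]
    rw [hfe]
    simp only [hd]
    rw [hm] at h
    apply rev_map_range
    intro j hj
    rcases Nat.eq_zero_or_pos j with hj0 | hj0
    · subst hj0
      rw [if_pos rfl]
      split_ifs with hpar <;> omega
    · rw [if_neg (by omega : ¬ j = 0)]
      simp only [Function.comp_apply]
      rw [hfun_cast]
      split_ifs <;> omega

theorem loopA_eq_shrink (v : List Int) (k : Nat) : ∀ (n p q a b : Int),
    loopA v k n p q a b =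
      if shrink p q ((idxSeq k n a b).map (fun i => PySem.List.pyGetD v i 0)) then "YES" else "NO" := by
  induction k with
  | zero => intro n p q a b; simp [loopA, idxSeq, shrink]
  | succ k ih =>
    intro n p q a b
    simp only [loopA, idxSeq]
    by_cases h : PySem.Int.mod n 2 = 0
    · simp only [h, beq_self_eq_true, if_pos, List.map_cons, shrink]
      by_cases h1 : PySem.List.pyGetD v a 0 = p
      · simp [h1, ih]
      · by_cases h2 : PySem.List.pyGetD v a 0 = q <;> (simp [beq_iff_eq, h1, h2, ih]; try (split_ifs <;> rfl))
    · simp only [if_neg h, show (PySem.Int.mod n 2 == 0) = false from beq_eq_false_iff_ne.mpr h,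
        Bool.false_eq_true, List.map_cons, shrink]
      by_cases h1 : PySem.List.pyGetD v b 0 = p
      · simp [h1, ih]
      · by_cases h2 : PySem.List.pyGetD v b 0 = q <;> (simp [beq_iff_eq, h1, h2, ih]; try (split_ifs <;> rfl))

theorem solveFA2017_eq_shrink (n : Int) (v : List Int) :
    solveFA2017 n v =
      if shrink 1 n ((fullIdx n).map (fun i => PySem.List.pyGetD v i 0)) then "YES" else "NO" := by
  unfold solveFA2017 fullIdx
  rcases mod_two_cases n with h | h
  · rw [if_neg (show ¬PySem.Int.mod n 2 = 1 by rw [h]; norm_num),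
        show (PySem.Int.mod n 2 == 1) = false from beq_eq_false_iff_ne.mpr (by rw [h]; norm_num)]
    simp only [Bool.false_eq_true, if_false]
    exact loopA_eq_shrink v n.toNat n 1 n _ _
  · rw [if_pos h, show (PySem.Int.mod n 2 == 1) = true from beq_iff_eq.mpr h]
    simp only [if_true, List.map_cons, shrink, beq_iff_eq]
    by_cases h1 : PySem.List.pyGetD v (PySem.Int.floordiv n 2) 0 = 1
    · simp only [h1, reduceIte]
      exact loopA_eq_shrink v (n-1).toNat (n-1) (1+1) n _ _
    · by_cases h2 : PySem.List.pyGetD v (PySem.Int.floordiv n 2) 0 = n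
      · simp only [if_neg h1]
        simp only [h2, reduceIte]
        exact loopA_eq_shrink v (n-1).toNat (n-1) 1 (n-1) _ _
      · simp only [h1, h2, Bool.false_eq_true, if_false]

-- core equivalence: A's shrinking scan of w ++ [x] succeeds consuming exactly [p, q]
-- iff B's growing scan of the reversed list ends at exactly (p, q)
theorem shrink_iff_grow (w : List Int) : ∀ (x p q : Int),
    (shrink p q (w ++ [x]) = true ∧ (w ++ [x]).length = (q + 1 - p).toNat) ↔
      List.foldl gstep (some (x, x)) w.reverse = some (p, q) := by
  induction w with
  | nil =>
    intro x p q
    simp only [List.nil_append, List.length_cons, List.length_nil, List.reverse_nil, List.foldl_nil]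
    constructor
    · rintro ⟨hs, hl⟩
      have hq : q = p := by omega
      subst hq
      simp only [shrink] at hs
      by_cases hx : x = q
      · subst hx; rfl
      · simp [hx] at hs
    · intro hR
      have h1 := Option.some.inj hR
      have hp : x = p := congrArg Prod.fst h1
      have hq : x = q := congrArg Prod.snd h1
      constructor
      · simp [shrink, hp]
      · omega
  | cons y w' ih =>
    intro x p q
    simp only [List.cons_append, List.reverse_cons, List.foldl_append, List.foldl_cons,
      List.foldl_nil]
    constructor
    · rintro ⟨hs, hl⟩
      simp only [List.length_cons, List.length_append, List.length_cons, List.length_nil] at hl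
      simp only [shrink] at hs
      by_cases hy : y = p
      · rw [if_pos hy] at hs
        have hR := (ih x (p+1) q).mp ⟨hs, by simp only [List.length_append,
          List.length_cons, List.length_nil]; omega⟩
        rw [hR]
        simp [gstep, hy]
      · rw [if_neg hy] at hs
        by_cases hy2 : y = q
        · rw [if_pos hy2] at hs
          have hR := (ih x p (q-1)).mp ⟨hs, by simp only [List.length_append,
            List.length_cons, List.length_nil]; omega⟩
          rw [hR]
          have hqp : ¬ (q = p - 1) := by omega
          simp [gstep, hy2, hqp]
        · rw [if_neg hy2] at hs
          exact absurd hs (by simp)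
    · intro hR
      rcases hEq : List.foldl gstep (some (x,x)) w'.reverse with _ | lohi
      · rw [hEq] at hR; simp [gstep] at hR
      · obtain ⟨lo, hi⟩ := lohi
        rw [hEq] at hR
        simp only [gstep] at hR
        by_cases c1 : y = lo - 1
        · rw [if_pos c1] at hR
          have h1 := Option.some.inj hR
          have hyp : y = p := congrArg Prod.fst h1
          have hhq : hi = q := congrArg Prod.snd h1
          have hlo : lo = p + 1 := by omega
          rw [hlo, hhq] at hEq
          obtain ⟨hs, hlen⟩ := (ih x (p+1) q).mpr hEq
          refine ⟨?_, ?_⟩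
          · simp only [shrink, if_pos hyp]
            exact hs
          · simp only [List.length_append, List.length_cons, List.length_nil] at hlen ⊢
            omega
        · rw [if_neg c1] at hR
          by_cases c2 : y = hi + 1
          · rw [if_pos c2] at hR
            have h1 := Option.some.inj hR
            have hlop : lo = p := congrArg Prod.fst h1
            have hyq : y = q := congrArg Prod.snd h1
            have hhi : hi = q - 1 := by omega
            rw [hlop, hhi] at hEq
            obtain ⟨hs, hlen⟩ := (ih x p (q-1)).mpr hEq
            have hqp : q - p ≥ 1 := by
              simp only [List.length_append, List.length_cons, List.length_nil] at hlen
              omega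
            refine ⟨?_, ?_⟩
            · simp only [shrink, if_neg (show ¬ y = p by omega), if_pos hyq]
              exact hs
            · simp only [List.length_append, List.length_cons, List.length_nil] at hlen ⊢
              omega
          · rw [if_neg c2] at hR
            exact absurd hR (by simp)

theorem altStep_eq_gstep (v : List Int) (n : Int) (st : Option (Int × Int)) (i : Int) :
    altStep v n st i = gstep st (PySem.List.pyGetD v (hfun n i) 0) := by
  cases st with
  | none => rfl
  | some lh =>
    obtain ⟨lo, hi⟩ := lh
    simp only [altStep, gstep, hfun]
    split_ifs <;> simp_all [beq_iff_eq]

theorem main_equiv (n : Int) (v : List Int) (h0 : 0 ≤ n) :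
    solveFA2017 n v = solveFA2017_alt n v := by
  rcases lt_or_ge 0 n with hn | hn
  case inr =>
    -- n = 0
    have : n = 0 := le_antisymm hn h0
    subst this
    rfl
  case inl =>
    rw [solveFA2017_eq_shrink]
    unfold solveFA2017_alt
    rw [if_neg (show ¬ n ≤ 0 by omega)]
    set val : Int → Int := fun i => PySem.List.pyGetD v i 0 with hval
    set L : List Int := (fullIdx n).map val with hL
    have hrev : L.reverse = val (n-1) :: (PySem.List.pyRange 1 n 1).map (fun i => val (hfun n i)) := by
      rw [hL, ← List.map_reverse, fullIdx_reverse n (by omega), List.map_cons, List.map_map]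
      rfl
    set x : Int := val (n-1) with hx
    set r : List Int := (PySem.List.pyRange 1 n 1).map (fun i => val (hfun n i)) with hr
    have hLdec : L = r.reverse ++ [x] := by
      rw [← List.reverse_reverse L, hrev]
      simp
    have hwrev : (r.reverse).reverse = r := List.reverse_reverse r
    have hlen : (r.reverse ++ [x]).length = (n + 1 - 1).toNat := by
      rw [← hLdec, hL, List.length_map, length_fullIdx n (by omega)]
      omega
    have hiff := shrink_iff_grow r.reverse x 1 n
    rw [hwrev] at hiff
    have hfold : (PySem.List.pyRange 1 n 1).foldl (altStep v n) (some (x, x)) =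
        List.foldl gstep (some (x, x)) r := by
      rw [hr, List.foldl_map]
      congr 1
      funext st i
      exact altStep_eq_gstep v n st i
    show (if shrink 1 n L then "YES" else "NO") =
      match (PySem.List.pyRange 1 n 1).foldl (altStep v n) (some (x, x)) with
      | none => "NO"
      | some (lo, hi) => if lo == 1 && hi == n then "YES" else "NO"
    rw [hfold]
    rcases hF : List.foldl gstep (some (x, x)) r with _ | ⟨lo, hi⟩
    · have hshr : ¬ shrink 1 n L = true := by
        intro hs
        have h2 := hiff.mp ⟨by rw [← hLdec]; exact hs, hlen⟩
        rw [hF] at h2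
        simp at h2
      rw [if_neg hshr]
    · show (if shrink 1 n L = true then "YES" else "NO") =
        if (lo == 1 && hi == n) = true then "YES" else "NO"
      by_cases hok : lo = 1 ∧ hi = n
      · have hs : shrink 1 n L = true := by
          have h2 := hiff.mpr (by rw [hF, hok.1, hok.2])
          rw [← hLdec] at h2
          exact h2.1
        rw [if_pos hs, if_pos (by simp [hok.1, hok.2])]
      · have hshr : ¬ shrink 1 n L = true := by
          intro hs
          have h2 := hiff.mp ⟨by rw [← hLdec]; exact hs, hlen⟩
          rw [hF] at h2
          have h1 := Option.some.inj h2
          exact hok ⟨congrArg Prod.fst h1, congrArg Prod.snd h1⟩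
        rw [if_neg hshr, if_neg (by simp only [Bool.and_eq_true, beq_iff_eq]; exact fun hc => hok hc)]

theorem main_equiv_neg_even (n : Int) (v : List Int) (h : n < 0)
    (he : PySem.Int.mod n 2 = 0) : solveFA2017 n v = solveFA2017_alt n v := by
  unfold solveFA2017 solveFA2017_alt
  rw [show (PySem.Int.mod n 2 == 1) = false from beq_eq_false_iff_ne.mpr (by rw [he]; norm_num)]
  simp only [Bool.false_eq_true, if_false]
  rw [show n.toNat = 0 by omega, if_pos (by omega : n ≤ 0)]
  rfl

-- ===== VERDICT (by name: the statement is the Claim_ definition above) =====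
theorem solveFA2017_spec : Claim_equal_solveFA2017 := by
  intro n v _ hpre
  unfold Spec_solveFA2017
  rcases hpre with ⟨h0, _⟩ | ⟨hneg, he⟩
  · exact main_equiv n v h0
  · exact main_equiv_neg_even n v hneg he
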